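-- pv_equiv track=rewrite | github.com/KW-Programmers-Algorithm-Study/Programmers | 대현/week8/8.2 모의고사.py | solution
-- ===== SOURCE A (Python) =====
-- def solution(answers):
--     answerLength = len(answers)
--     answer = []
--     soopo1 = [1,2,3,4,5]
--     soopo2 = [2,1,2,3,2,4,2,5]
--     soopo3 = [3,3,1,1,2,2,4,4,5,5]
--
--     #답안지의 길이에 맞게 각각 수포자들의 정오표를 제작
--     soopo1Answer = soopo1 * (answerLength // len(soopo1)) + soopo1[:(answerLength % len(soopo1))]
--     soopo2Answer = soopo2 * (answerLength // len(soopo2)) + soopo2[:(answerLength % len(soopo2))]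
--     soopo3Answer = soopo3 * (answerLength // len(soopo3)) + soopo3[:(answerLength % len(soopo3))]
--
--     soopo1Correct=0
--     soopo2Correct=0
--     soopo3Correct=0
--
--     #반복문을 돌면서 채점
--     for i in range(answerLength):
--         if(answers[i] == soopo1Answer[i]):
--             soopo1Correct += 1
--         if(answers[i] == soopo2Answer[i]):
--             soopo2Correct += 1
--         if(answers[i] == soopo3Answer[i]):
--             soopo3Correct += 1
--
--     #가장 많이 맞춘 애들 정답에 추가
--     if(soopo1Correct >= soopo2Correct and soopo1Correct >= soopo3Correct):
--         answer.append(1)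
--     if(soopo2Correct >= soopo1Correct and soopo2Correct >= soopo3Correct):
--         answer.append(2)
--     if(soopo3Correct >= soopo1Correct and soopo3Correct >= soopo2Correct):
--         answer.append(3)
--
--     return answer
-- ===== SOURCE B (Python) =====
-- def solution(answers):
--     # One pass builds a histogram keyed by (position mod 40, answer value); since
--     # 5, 8 and 10 all divide 40, each student's score is read off the histogram
--     # without rescanning the answers.
--     hist = {}
--     for i, a in enumerate(answers):
--         key = (i % 40, a)
--         hist[key] = hist.get(key, 0) + 1
--     patterns = [[1, 2, 3, 4, 5],
--                 [2, 1, 2, 3, 2, 4, 2, 5],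
--                 [3, 3, 1, 1, 2, 2, 4, 4, 5, 5]]
--     scores = [sum(hist.get((r, p[r % len(p)]), 0) for r in range(40))
--               for p in patterns]
--     best = max(scores)
--     return [i + 1 for i, s in enumerate(scores) if s == best]
-- ===== Notes on version B (the rewrite author's own statement) =====
-- stated objective: alternative
-- what changed: B makes one pass building a dict histogram keyed by (index mod 40, answer) -- 40 = lcm of the three pattern lengths -- then reads each student's score as a 40-term sum of histogram lookups instead of A's per-position grading against three pre-expanded answer tables, and picks winners by max + filter instead of cascaded pairwise >= tests.
import Mathlib
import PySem

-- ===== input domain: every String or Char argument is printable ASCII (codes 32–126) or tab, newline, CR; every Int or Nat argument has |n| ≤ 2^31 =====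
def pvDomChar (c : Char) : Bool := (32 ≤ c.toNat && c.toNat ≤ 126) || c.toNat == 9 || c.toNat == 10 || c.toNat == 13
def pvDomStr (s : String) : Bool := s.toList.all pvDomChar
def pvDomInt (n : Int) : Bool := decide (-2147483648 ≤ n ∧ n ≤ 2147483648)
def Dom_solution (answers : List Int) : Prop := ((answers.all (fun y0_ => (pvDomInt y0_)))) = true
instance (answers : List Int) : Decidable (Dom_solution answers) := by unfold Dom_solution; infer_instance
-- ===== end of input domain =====

-- B builds a (index mod 40, answer) histogram in one pass (40 = lcm of the pattern lengths) and
-- reads each score as a 40-term sum of lookups, selecting winners by max + filter, instead of A's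
-- pre-expanded answer tables, per-position grading loop and cascaded pairwise >= comparisons.


-- ===== PORT A =====
-- Python `lst * k` (k = n // len ≥ 0) is ported as flatten of k copies — exact for k ≥ 0.
def solution (answers : List Int) : List Int :=
  let answerLength : Int := (answers.length : Int)
  let answer : List Int := []
  let soopo1 : List Int := [1,2,3,4,5]
  let soopo2 : List Int := [2,1,2,3,2,4,2,5]
  let soopo3 : List Int := [3,3,1,1,2,2,4,4,5,5]
  let soopo1Answer :=
    (List.replicate (PySem.Int.floordiv answerLength (soopo1.length : Int)).toNat soopo1).flatten
      ++ PySem.List.slice soopo1 none (some (PySem.Int.mod answerLength (soopo1.length : Int)))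
  let soopo2Answer :=
    (List.replicate (PySem.Int.floordiv answerLength (soopo2.length : Int)).toNat soopo2).flatten
      ++ PySem.List.slice soopo2 none (some (PySem.Int.mod answerLength (soopo2.length : Int)))
  let soopo3Answer :=
    (List.replicate (PySem.Int.floordiv answerLength (soopo3.length : Int)).toNat soopo3).flatten
      ++ PySem.List.slice soopo3 none (some (PySem.Int.mod answerLength (soopo3.length : Int)))
  let cs := (PySem.List.pyRange 0 answerLength 1).foldl
    (fun (c : Int × Int × Int) i =>
      (if PySem.List.pyGetD answers i 0 == PySem.List.pyGetD soopo1Answer i 0 then c.1 + 1 else c.1,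
       if PySem.List.pyGetD answers i 0 == PySem.List.pyGetD soopo2Answer i 0 then c.2.1 + 1 else c.2.1,
       if PySem.List.pyGetD answers i 0 == PySem.List.pyGetD soopo3Answer i 0 then c.2.2 + 1 else c.2.2))
    ((0 : Int), (0 : Int), (0 : Int))
  let answer := if cs.1 ≥ cs.2.1 ∧ cs.1 ≥ cs.2.2 then answer ++ [1] else answer
  let answer := if cs.2.1 ≥ cs.1 ∧ cs.2.1 ≥ cs.2.2 then answer ++ [2] else answer
  let answer := if cs.2.2 ≥ cs.1 ∧ cs.2.2 ≥ cs.2.1 then answer ++ [3] else answer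
  answer

-- ===== PORT B =====
-- hist[key] = hist.get(key, 0) + 1 is ported as Dict.insert key (getD key 0 + 1);
-- sum(... for r in range(40)) is ported as .sum of a map over pyRange 0 40 1.
def solution_alt (answers : List Int) : List Int :=
  let hist : PySem.Dict (Int × Int) Int :=
    (PySem.List.enumerate answers 0).foldl
      (fun d ia =>
        d.insert (PySem.Int.mod ia.1 40, ia.2)
          (d.getD (PySem.Int.mod ia.1 40, ia.2) 0 + 1))
      PySem.Dict.empty
  let patterns : List (List Int) := [[1,2,3,4,5],[2,1,2,3,2,4,2,5],[3,3,1,1,2,2,4,4,5,5]]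
  let scores : List Int := patterns.map (fun p =>
    ((PySem.List.pyRange 0 40 1).map (fun r =>
      hist.getD (r, PySem.List.pyGetD p (PySem.Int.mod r (p.length : Int)) 0) 0)).sum)
  let best := PySem.List.maxD scores id 0
  (PySem.List.enumerate scores 0).filterMap
    (fun is => if is.2 == best then some (is.1 + 1) else none)

-- ===== PRECONDITION & SPEC =====
def Spec_solution (answers : List Int) (out : List Int) : Prop := out = solution_alt answers
instance (answers : List Int) (out : List Int) : Decidable (Spec_solution answers out) := by unfold Spec_solution; infer_instance

-- ===== CLAIM (what is proved, stated in full; the proofs are below) =====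
def Claim_equal_solution : Prop := ∀ (answers : List Int), Dom_solution answers → Spec_solution answers (solution answers)

-- ===== LEMMAS AND PROOFS =====

-- canonical per-pattern score: number of positions k where answers[k] = p[k % len p]
def cntR (p xs : List Int) : Int :=
  (((List.range xs.length).countP (fun k => xs.getD k 0 == p.getD (k % p.length) 0) : Nat) : Int)

theorem foldl_triple {α : Type} (f g h : Int → α → Int) :
    ∀ (l : List α) (a b c : Int),
      l.foldl (fun s x => (f s.1 x, g s.2.1 x, h s.2.2 x)) (a, b, c)
        = (l.foldl f a, l.foldl g b, l.foldl h c) := by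
  intro l
  induction l with
  | nil => intro a b c; rfl
  | cons x t ih => intro a b c; simpa [List.foldl] using ih (f a x) (g b x) (h c x)

-- expanded table indexing: ((p*q) ++ p[:r])[k] = p[k % len p] for k < q*len p + r
theorem tbl_getD (p : List Int) :
    ∀ (q : Nat) (r k : Nat), r ≤ p.length → k < q * p.length + r →
      ((List.replicate q p).flatten ++ p.take r).getD k 0 = p.getD (k % p.length) 0 := by
  intro q
  induction q with
  | zero =>
    intro r k hr hk
    simp only [List.replicate, List.flatten_nil, List.nil_append] at *
    have hkr : k < r := by omega
    have hkL : k < p.length := by omega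
    rw [List.getD, List.getD, List.getElem?_take_of_lt hkr, Nat.mod_eq_of_lt hkL]
  | succ q ih =>
    intro r k hr hk
    rw [List.replicate_succ, List.flatten_cons, List.append_assoc]
    by_cases hkL : k < p.length
    · rw [List.getD, List.getElem?_append_left hkL, ← List.getD, Nat.mod_eq_of_lt hkL]
    · rw [Nat.not_lt] at hkL
      rw [List.getD, List.getElem?_append_right hkL, ← List.getD]
      rw [Nat.succ_mul] at hk
      have h1 : k - p.length < q * p.length + r := by omega
      have h2 : k % p.length = (k - p.length) % p.length := by
        conv_lhs => rw [show k = p.length + (k - p.length) by omega]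
        rw [Nat.add_mod_left]
      rw [ih r (k - p.length) hr h1, h2]

-- A's grading loop over one table equals the canonical score
theorem count_A (xs tbl p : List Int)
    (htbl : ∀ k, k < xs.length → tbl.getD k 0 = p.getD (k % p.length) 0) :
    (PySem.List.pyRange 0 (xs.length : Int) 1).foldl
      (fun c i => if PySem.List.pyGetD xs i 0 == PySem.List.pyGetD tbl i 0 then c + 1 else c) 0
    = cntR p xs := by
  rw [PySem.List.pyRange_zero_nat, List.foldl_map]
  simp only [PySem.List.pyGetD_natCast]
  rw [PySem.List.foldl_count_if (fun k => xs.getD k 0 == tbl.getD k 0) (List.range xs.length) 0]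
  unfold cntR
  rw [List.countP_congr]
  · ring
  · intro k hk
    rw [htbl k (List.mem_range.mp hk)]

-- index-shifted recursive score, mediating between B's histogram sum and cntR
def cnt (p : List Int) : List Int → Nat → Nat
  | [], _ => 0
  | a :: t, s => (if a == p.getD (s % p.length) 0 then 1 else 0) + cnt p t (s + 1)

theorem cnt_eq_cntR (p : List Int) :
    ∀ (xs : List Int) (s : Nat),
      (cnt p xs s : Int)
        = (((List.range xs.length).countP
            (fun k => xs.getD k 0 == p.getD ((s + k) % p.length) 0) : Nat) : Int) := by
  intro xs
  induction xs with
  | nil => intro s; simp [cnt]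
  | cons a t ih =>
    intro s
    rw [List.length_cons, List.range_succ_eq_map, List.countP_cons, List.countP_map]
    simp only [Function.comp_def, List.getD_cons_zero, List.getD_cons_succ, Nat.add_zero]
    rw [List.countP_congr (l := List.range t.length)
      (p := fun k => t.getD k 0 == p.getD ((s + (k + 1)) % p.length) 0)
      (q := fun k => t.getD k 0 == p.getD (((s + 1) + k) % p.length) 0)
      (fun k _ => by have hsk : s + (k + 1) = (s + 1) + k := by omega
                     simp only [hsk])]
    unfold cnt
    have := ih (s + 1)
    by_cases h : (a == p.getD (s % p.length) 0) = true
    · simp only [h, if_pos]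
      push_cast at this ⊢
      omega
    · simp only [h, if_neg, Bool.false_eq_true, not_false_iff]
      push_cast at this ⊢
      omega

-- a sum over range n picking out the single index m
theorem sum_range_pick (P : Nat → Int) (m : Nat) :
    ∀ n : Nat, ((List.range n).map (fun k => if m = k then P k else 0)).sum
      = if m < n then P m else 0 := by
  intro n
  induction n with
  | zero => simp
  | succ n ih =>
    rw [List.range_succ, List.map_append, List.sum_append, ih]
    by_cases h : m = n
    · subst h; simp
    · by_cases h2 : m < n
    <;> simp [h2, h] <;> omega

-- the histogram key B reads for residue r, and the key-count of a (shifted) enumeration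
def keyOf (p : List Int) (r : Int) : Int × Int :=
  (r, PySem.List.pyGetD p (PySem.Int.mod r (p.length : Int)) 0)

def keyCount (xs : List Int) (s : Int) (k : Int × Int) : Int :=
  ((((PySem.List.enumerate xs s).map (fun ia => (PySem.Int.mod ia.1 40, ia.2))).count k : Nat) : Int)

theorem keyCount_cons (a : Int) (t : List Int) (s : Int) (k : Int × Int) :
    keyCount (a :: t) s k
      = keyCount t (s + 1) k + (if ((PySem.Int.mod s 40, a) == k) then (1 : Int) else 0) := by
  unfold keyCount
  rw [PySem.List.enumerate_cons, List.map_cons, List.count_cons]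
  split <;> simp

-- B's 40-term histogram sum over the keys of a (shifted) enumeration equals cnt
theorem sum_hist (p : List Int) (hp : p.length ∣ 40) :
    ∀ (xs : List Int) (s : Nat),
      ((PySem.List.pyRange 0 40 1).map (fun r => keyCount xs (s : Int) (keyOf p r))).sum
        = (cnt p xs s : Int) := by
  intro xs
  induction xs with
  | nil => intro s; simp [keyCount, PySem.List.enumerate_nil, cnt]
  | cons a t ih =>
    intro s
    have hca : ∀ r : Int, keyCount (a :: t) (s : Int) (keyOf p r)
        = keyCount t ((s : Int) + 1) (keyOf p r)
          + (if ((PySem.Int.mod (s : Int) 40, a) == keyOf p r) then (1 : Int) else 0) :=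
      fun r => keyCount_cons a t (s : Int) (keyOf p r)
    simp only [hca]
    rw [PySem.List.sum_map_add_int]
    have hcast : (s : Int) + 1 = ((s + 1 : Nat) : Int) := by push_cast; ring
    rw [hcast, ih (s + 1)]
    have hm : s % 40 < 40 := Nat.mod_lt s (by norm_num)
    have hind :
        ((PySem.List.pyRange 0 40 1).map (fun r =>
            if ((PySem.Int.mod (s : Int) 40, a) == keyOf p r) then (1 : Int) else 0)).sum
          = if a == p.getD (s % p.length) 0 then 1 else 0 := by
      rw [show (40 : Int) = ((40 : Nat) : Int) from by norm_num, PySem.List.pyRange_zero_nat,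
          List.map_map]
      have hre :
          ((fun r : Int =>
              if ((PySem.Int.mod (s : Int) ((40 : Nat) : Int), a) == keyOf p r) then (1 : Int) else 0)
             ∘ (fun k : Nat => (k : Int)))
            = fun k : Nat => if s % 40 = k then
                (if a == p.getD (k % p.length) 0 then (1 : Int) else 0) else 0 := by
        funext k
        simp only [Function.comp_def, keyOf, PySem.Int.mod_natCast, PySem.List.pyGetD_natCast]
        by_cases h1 : s % 40 = k
        · simp [h1]
        · simp only [h1, if_false]
          simp
          intro hh
          exact absurd (show s % 40 = k by omega) h1
      rw [hre, sum_range_pick (fun k => if a == p.getD (k % p.length) 0 then (1 : Int) else 0)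
            (s % 40) 40, if_pos hm, Nat.mod_mod_of_dvd s hp]
    rw [hind]
    have hc : cnt p (a :: t) s
        = (if a == p.getD (s % p.length) 0 then 1 else 0) + cnt p t (s + 1) := rfl
    rw [hc]
    push_cast [apply_ite (fun n : Nat => (n : Int))]
    ring

theorem maxD_three (a b c : Int) : PySem.List.maxD [a, b, c] id 0 = max a (max b c) := by
  simp only [PySem.List.maxD, PySem.List.max?, List.foldl, id]
  rcases lt_or_ge a b with h | h
  · rw [if_pos h]
    show (if b < c then some c else some b).getD 0 = max a (max b c)
    split_ifs <;> simp <;> omega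
  · rw [if_neg (not_lt.mpr h)]
    show (if a < c then some c else some a).getD 0 = max a (max b c)
    split_ifs <;> simp <;> omega

theorem select_eq (a b c M : Int)
    (h1 : (a ≥ b ∧ a ≥ c) ↔ a = M) (h2 : (b ≥ a ∧ b ≥ c) ↔ b = M)
    (h3 : (c ≥ a ∧ c ≥ b) ↔ c = M) :
    (let x0 : List Int := []
     let x1 := if a ≥ b ∧ a ≥ c then x0 ++ [1] else x0
     let x2 := if b ≥ a ∧ b ≥ c then x1 ++ [2] else x1
     if c ≥ a ∧ c ≥ b then x2 ++ [3] else x2)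
    = (PySem.List.enumerate [a, b, c] 0).filterMap
        (fun is => if is.2 == M then some (is.1 + 1) else none) := by
  simp only [PySem.List.enumerate_cons, PySem.List.enumerate_nil, List.filterMap_cons,
    List.filterMap_nil, beq_iff_eq, h1, h2, h3]
  norm_num
  split_ifs <;> simp

-- B's full per-pattern score expression equals the canonical score
theorem score_B (p xs : List Int) (hp : p.length ∣ 40) :
    ((PySem.List.pyRange 0 40 1).map (fun r =>
      (((PySem.List.enumerate xs 0).foldl
          (fun (d : PySem.Dict (Int × Int) Int) ia =>
            d.insert (PySem.Int.mod ia.1 40, ia.2)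
              (d.getD (PySem.Int.mod ia.1 40, ia.2) 0 + 1))
          PySem.Dict.empty).getD
        (r, PySem.List.pyGetD p (PySem.Int.mod r (p.length : Int)) 0) 0))).sum
    = cntR p xs := by
  have hfold :
      (PySem.List.enumerate xs 0).foldl
          (fun (d : PySem.Dict (Int × Int) Int) ia =>
            d.insert (PySem.Int.mod ia.1 40, ia.2)
              (d.getD (PySem.Int.mod ia.1 40, ia.2) 0 + 1))
          PySem.Dict.empty
        = PySem.Dict.counter
            ((PySem.List.enumerate xs 0).map (fun ia => (PySem.Int.mod ia.1 40, ia.2))) := by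
    rw [← PySem.Dict.foldl_insert_getD_add_one_eq_counter, List.foldl_map]
  rw [hfold]
  simp only [PySem.Dict.getD_counter]
  have h := sum_hist p hp xs 0
  simp only [Nat.cast_zero] at h
  have h2 : (cnt p xs 0 : Int) = cntR p xs := by
    rw [cnt_eq_cntR p xs 0]
    unfold cntR
    congr 1
    apply List.countP_congr
    intro k _
    rw [Nat.zero_add]
  exact h.trans h2

-- ===== VERDICT (by name: the statement is the Claim_ definition above) =====
theorem solution_spec : Claim_equal_solution := by
  intro answers _
  unfold Spec_solution
  simp only [solution, solution_alt]
  simp only [PySem.Int.floordiv_natCast, PySem.Int.mod_natCast, Int.toNat_natCast,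
    PySem.List.slice_to_natCast]
  set t1 := (List.replicate (answers.length / [(1:Int), 2, 3, 4, 5].length) [(1:Int), 2, 3, 4, 5]).flatten ++
      List.take (answers.length % [(1:Int), 2, 3, 4, 5].length) [(1:Int), 2, 3, 4, 5] with ht1
  set t2 := (List.replicate (answers.length / [(2:Int), 1, 2, 3, 2, 4, 2, 5].length) [(2:Int), 1, 2, 3, 2, 4, 2, 5]).flatten ++
      List.take (answers.length % [(2:Int), 1, 2, 3, 2, 4, 2, 5].length) [(2:Int), 1, 2, 3, 2, 4, 2, 5] with ht2
  set t3 := (List.replicate (answers.length / [(3:Int), 3, 1, 1, 2, 2, 4, 4, 5, 5].length) [(3:Int), 3, 1, 1, 2, 2, 4, 4, 5, 5]).flatten ++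
      List.take (answers.length % [(3:Int), 3, 1, 1, 2, 2, 4, 4, 5, 5].length) [(3:Int), 3, 1, 1, 2, 2, 4, 4, 5, 5] with ht3
  rw [foldl_triple
    (fun a i => if PySem.List.pyGetD answers i 0 == PySem.List.pyGetD t1 i 0 then a + 1 else a)
    (fun a i => if PySem.List.pyGetD answers i 0 == PySem.List.pyGetD t2 i 0 then a + 1 else a)
    (fun a i => if PySem.List.pyGetD answers i 0 == PySem.List.pyGetD t3 i 0 then a + 1 else a)]
  have hmk : ∀ k, k < answers.length → t1.getD k 0 = List.getD [(1:Int),2,3,4,5] (k % [(1:Int),2,3,4,5].length) 0 := by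
    intro k hk
    rw [ht1]
    exact tbl_getD [(1:Int),2,3,4,5] (answers.length / 5) (answers.length % 5) k
      (by simp; omega) (by simp; omega)
  have hmk2 : ∀ k, k < answers.length → t2.getD k 0 = List.getD [(2:Int),1,2,3,2,4,2,5] (k % [(2:Int),1,2,3,2,4,2,5].length) 0 := by
    intro k hk
    rw [ht2]
    exact tbl_getD [(2:Int),1,2,3,2,4,2,5] (answers.length / 8) (answers.length % 8) k
      (by simp; omega) (by simp; omega)
  have hmk3 : ∀ k, k < answers.length → t3.getD k 0 = List.getD [(3:Int),3,1,1,2,2,4,4,5,5] (k % [(3:Int),3,1,1,2,2,4,4,5,5].length) 0 := by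
    intro k hk
    rw [ht3]
    exact tbl_getD [(3:Int),3,1,1,2,2,4,4,5,5] (answers.length / 10) (answers.length % 10) k
      (by simp; omega) (by simp; omega)
  rw [count_A answers t1 [(1:Int),2,3,4,5] hmk, count_A answers t2 [(2:Int),1,2,3,2,4,2,5] hmk2,
      count_A answers t3 [(3:Int),3,1,1,2,2,4,4,5,5] hmk3]
  simp only [List.map_cons, List.map_nil]
  simp only [score_B [(1:Int),2,3,4,5] answers (by norm_num),
      score_B [(2:Int),1,2,3,2,4,2,5] answers (by norm_num),
      score_B [(3:Int),3,1,1,2,2,4,4,5,5] answers (by norm_num), maxD_three]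
  exact select_eq (cntR [(1:Int),2,3,4,5] answers) (cntR [(2:Int),1,2,3,2,4,2,5] answers)
    (cntR [(3:Int),3,1,1,2,2,4,4,5,5] answers) _ (by omega) (by omega) (by omega)
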